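-- pv_equiv track=rewrite | github.com/Bapper-Ik/Hacker-rank | challenge-35.py | check_stack_possibility
-- ===== SOURCE A (Python) =====
-- def check_stack_possibility(N, side_lengths):
--     left = 0  # Pointer for the leftmost cube
--     right = N - 1  # Pointer for the rightmost cube
--     prev_cube = float('inf')  # Keep track of the side length of the previous cube
--
--     while left <= right:
--         if side_lengths[left] >= side_lengths[right]:
--             current_cube = side_lengths[left]
--             left += 1
--         else:
--             current_cube = side_lengths[right]
--             right -= 1
--
--         # If the current cube side length is greater than the previous cube, it's not possible to stack them
--         if current_cube > prev_cube:
--             return "No"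
--         prev_cube = current_cube
--
--     return "Yes"
-- ===== SOURCE B (Python) =====
-- def check_stack_possibility(N, side_lengths):
--     xs = side_lengths[:max(N, 0)]
--     n = len(xs)
--     i = 1
--     # descending phase: advance while weakly non-increasing
--     while i < n and xs[i] <= xs[i - 1]:
--         i += 1
--     # ascending phase: the rest must be weakly non-decreasing
--     while i < n:
--         if xs[i] < xs[i - 1]:
--             return "No"
--         i += 1
--     return "Yes"
-- ===== Notes on version B (the rewrite author's own statement) =====
-- stated objective: simpler
-- what changed: Replaces A's two-pointer greedy (repeatedly taking the larger of the two ends while tracking the previous cube) by a single left-to-right valley scan: skip the weakly non-increasing prefix, then require the remainder to be weakly non-decreasing.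
import Mathlib
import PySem

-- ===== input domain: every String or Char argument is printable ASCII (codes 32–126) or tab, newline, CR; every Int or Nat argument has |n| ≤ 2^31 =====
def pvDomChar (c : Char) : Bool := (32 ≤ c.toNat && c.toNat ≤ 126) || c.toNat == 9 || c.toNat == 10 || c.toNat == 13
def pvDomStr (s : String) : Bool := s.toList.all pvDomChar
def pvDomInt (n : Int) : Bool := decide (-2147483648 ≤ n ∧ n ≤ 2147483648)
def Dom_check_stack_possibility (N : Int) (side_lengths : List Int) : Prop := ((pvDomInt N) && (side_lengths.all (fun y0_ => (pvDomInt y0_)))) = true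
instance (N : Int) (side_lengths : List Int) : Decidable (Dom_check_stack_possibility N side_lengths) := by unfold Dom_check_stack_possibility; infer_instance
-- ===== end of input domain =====

-- B replaces A's two-pointer greedy by a single left-to-right valley check (non-increasing
-- run, then the rest must be non-decreasing); objective: simpler.

-- ===== PORT A =====
-- prev_cube starts as float('inf'); `none` models infinity: `current > inf` is never true.
def aCheckGt (current : Int) (prev : Option Int) : Bool :=
  match prev with
  | some p => decide (current > p)
  | none => false

-- the while loop; fuel = (right - left + 1).toNat counts the remaining iterations,
-- so fuel = 0 exactly when left > right (the loop exit).  `none` from pyGet? is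
-- Python's IndexError, excluded by Pre_ (the fallback value is unreachable there).
def aLoop (xs : List Int) : Nat → Int → Int → Option Int → String
  | 0, _, _, _ => "Yes"
  | f + 1, left, right, prev =>
    match PySem.List.pyGet? xs left, PySem.List.pyGet? xs right with
    | some L, some R =>
      if L ≥ R then
        if aCheckGt L prev then "No" else aLoop xs f (left + 1) right (some L)
      else
        if aCheckGt R prev then "No" else aLoop xs f left (right - 1) (some R)
    | _, _ => "Yes"

def check_stack_possibility (N : Int) (side_lengths : List Int) : String :=
  aLoop side_lengths N.toNat 0 (N - 1) none

-- ===== PORT B =====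
-- the second while loop: the remaining elements must be weakly non-decreasing
-- (prev carries xs[i-1], the list argument is the suffix from i).
def bUp (prev : Int) : List Int → String
  | [] => "Yes"
  | x :: rest => if x < prev then "No" else bUp x rest

-- the first while loop: skip the weakly non-increasing prefix, then hand over to bUp.
def bDown (prev : Int) : List Int → String
  | [] => "Yes"
  | x :: rest => if x ≤ prev then bDown x rest else bUp x rest

def check_stack_possibility_alt (N : Int) (side_lengths : List Int) : String :=
  match PySem.List.slice side_lengths none (some (max N 0)) with
  | [] => "Yes"
  | a :: rest => bDown a rest

-- ===== PRECONDITION & SPEC =====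
-- A raises IndexError (side_lengths[right] with right = N-1 past the end) exactly when
-- N > len(side_lengths); Pre_ is exactly the set of inputs on which A returns.
def Pre_check_stack_possibility (N : Int) (side_lengths : List Int) : Prop :=
  N ≤ side_lengths.length

instance (N : Int) (side_lengths : List Int) : Decidable (Pre_check_stack_possibility N side_lengths) := by
  unfold Pre_check_stack_possibility; infer_instance

def pvWitness_check_stack_possibility : Int × List Int := (4, [5, 3, 3, 7])

def Spec_check_stack_possibility (N : Int) (side_lengths : List Int) (out : String) : Prop := out = check_stack_possibility_alt N side_lengths
instance (N : Int) (side_lengths : List Int) (out : String) : Decidable (Spec_check_stack_possibility N side_lengths out) := by unfold Spec_check_stack_possibility; infer_instance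

-- ===== CLAIM (what is proved, stated in full; the proofs are below) =====
def Claim_equal_check_stack_possibility : Prop := ∀ (N : Int) (side_lengths : List Int), Dom_check_stack_possibility N side_lengths → Pre_check_stack_possibility N side_lengths → Spec_check_stack_possibility N side_lengths (check_stack_possibility N side_lengths)

-- ===== LEMMAS AND PROOFS =====

-- Boolean "weakly non-decreasing" and "valley" (non-increasing then non-decreasing).
def nondecB : List Int → Bool
  | [] => true
  | [_] => true
  | a :: b :: t => decide (a ≤ b) && nondecB (b :: t)

def valleyB : List Int → Bool
  | [] => true
  | [_] => true
  | a :: b :: t => if b ≤ a then valleyB (b :: t) else nondecB (a :: b :: t)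

-- A's loop as a pure function on the remaining segment (consumed from both ends).
def tp : List Int → Option Int → String
  | [], _ => "Yes"
  | a :: rest, prev =>
    if a ≥ (a :: rest).getLast (by simp) then
      if aCheckGt a prev then "No" else tp rest (some a)
    else
      if aCheckGt ((a :: rest).getLast (by simp)) prev then "No"
      else tp ((a :: rest).dropLast) (some ((a :: rest).getLast (by simp)))
termination_by ys _ => ys.length
decreasing_by all_goals simp

def bnd (prev : Option Int) (ys : List Int) : Bool :=
  match prev with
  | none => true
  | some p => ys.all (fun x => decide (x ≤ p))

theorem nd_le_last : ∀ (t : List Int) (a : Int), nondecB (a :: t) = true →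
    ∀ x ∈ a :: t, x ≤ (a :: t).getLast (by simp) := by
  intro t
  induction t with
  | nil => intro a _ x hx; simp at hx; simp [hx, List.getLast]
  | cons b s ih =>
    intro a h x hx
    simp only [nondecB, Bool.and_eq_true, decide_eq_true_eq] at h
    have hlast : (a :: b :: s).getLast (by simp) = (b :: s).getLast (by simp) := by
      simp [List.getLast]
    rw [hlast]
    rcases List.mem_cons.mp hx with rfl | hx'
    · have hb := ih b h.2 b (List.mem_cons_self)
      omega
    · exact ih b h.2 x hx' 

theorem v_le : ∀ (t : List Int) (a : Int), valleyB (a :: t) = true →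
    ∀ x ∈ a :: t, x ≤ a ∨ x ≤ (a :: t).getLast (by simp) := by
  intro t
  induction t with
  | nil => intro a _ x hx; simp at hx; omega
  | cons b s ih =>
    intro a h x hx
    by_cases hba : b ≤ a
    · have hv : valleyB (b :: s) = true := by simpa [valleyB, hba] using h
      have hlast : (a :: b :: s).getLast (by simp) = (b :: s).getLast (by simp) := by
        simp [List.getLast]
      rw [hlast]
      rcases List.mem_cons.mp hx with rfl | hx'
      · left; omega
      · rcases ih b hv x hx' with h1 | h1
        · left; omega
        · right; exact h1
    · have hnd : nondecB (a :: b :: s) = true := by simpa [valleyB, hba] using h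
      right; exact nd_le_last (b :: s) a hnd x hx

theorem nd_dropLast : ∀ (ys : List Int), nondecB ys = true → nondecB ys.dropLast = true := by
  intro ys
  induction ys with
  | nil => simp [nondecB]
  | cons a t ih =>
    cases t with
    | nil => intro _; simp [nondecB, List.dropLast]
    | cons b s =>
      intro h
      simp only [nondecB, Bool.and_eq_true, decide_eq_true_eq] at h
      have h2 := ih h.2
      cases s with
      | nil => simp [nondecB]
      | cons c r =>
        have e1 : (a :: b :: c :: r).dropLast = a :: (b :: c :: r).dropLast := by
          simp [List.dropLast]
        have e2 : (b :: c :: r).dropLast = b :: (c :: r).dropLast := by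
          simp [List.dropLast]
        rw [e1, e2]
        rw [e2] at h2
        simp only [nondecB, Bool.and_eq_true, decide_eq_true_eq]
        exact ⟨h.1, h2⟩

theorem v_of_nd : ∀ (ys : List Int), nondecB ys = true → valleyB ys = true := by
  intro ys
  induction ys with
  | nil => simp [valleyB]
  | cons a t ih =>
    cases t with
    | nil => intro _; simp [valleyB]
    | cons b s =>
      intro h
      simp only [nondecB, Bool.and_eq_true, decide_eq_true_eq] at h
      by_cases hba : b ≤ a
      · simp [valleyB, hba, ih h.2]
      · simp only [valleyB, if_neg hba, nondecB, Bool.and_eq_true, decide_eq_true_eq]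
        exact h

theorem v_dropLast : ∀ (ys : List Int), valleyB ys = true → valleyB ys.dropLast = true := by
  intro ys
  induction ys with
  | nil => simp [valleyB]
  | cons a t ih =>
    cases t with
    | nil => intro _; simp [valleyB, List.dropLast]
    | cons b s =>
      intro h
      by_cases hba : b ≤ a
      · have hv : valleyB (b :: s) = true := by simpa [valleyB, hba] using h
        have h2 := ih hv
        cases s with
        | nil => simp [valleyB]
        | cons c r =>
          have e1 : (a :: b :: c :: r).dropLast = a :: (b :: c :: r).dropLast := by
            simp [List.dropLast]
          have e2 : (b :: c :: r).dropLast = b :: (c :: r).dropLast := by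
            simp [List.dropLast]
          rw [e1, e2]
          rw [e2] at h2
          simpa [valleyB, hba] using h2
      · have hnd : nondecB (a :: b :: s) = true := by simpa [valleyB, hba] using h
        exact v_of_nd _ (nd_dropLast _ hnd)

theorem nd_append : ∀ (ys : List Int) (R : Int), nondecB ys = true → (∀ x ∈ ys, x ≤ R) →
    nondecB (ys ++ [R]) = true := by
  intro ys
  induction ys with
  | nil => intro R _ _; simp [nondecB]
  | cons a t ih =>
    intro R h hall
    cases t with
    | nil =>
      have : a ≤ R := hall a (List.mem_cons_self)
      simp [nondecB, this]
    | cons b s =>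
      simp only [nondecB, Bool.and_eq_true, decide_eq_true_eq] at h
      have ih2 := ih R h.2 (fun x hx => hall x (List.mem_cons_of_mem a hx))
      simp only [List.cons_append, nondecB, Bool.and_eq_true, decide_eq_true_eq] at ih2 ⊢
      exact ⟨h.1, ih2⟩

theorem v_append : ∀ (ys : List Int) (R : Int), valleyB ys = true → (∀ x ∈ ys, x ≤ R) →
    valleyB (ys ++ [R]) = true := by
  intro ys
  induction ys with
  | nil => intro R _ _; simp [valleyB]
  | cons a t ih =>
    intro R h hall
    cases t with
    | nil =>
      have : a ≤ R := hall a (List.mem_cons_self)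
      by_cases hRa : R ≤ a <;> simp [valleyB, nondecB, hRa, this]
    | cons b s =>
      by_cases hba : b ≤ a
      · have hv : valleyB (b :: s) = true := by simpa [valleyB, hba] using h
        have ih2 := ih R hv (fun x hx => hall x (List.mem_cons_of_mem a hx))
        simpa [valleyB, hba] using ih2
      · have hnd : nondecB (a :: b :: s) = true := by simpa [valleyB, hba] using h
        have := nd_append (a :: b :: s) R hnd hall
        simpa [valleyB, hba] using this

theorem vL : ∀ (t : List Int) (a : Int), a ≥ (a :: t).getLast (by simp) →
    (valleyB (a :: t) = true ↔ valleyB t = true ∧ ∀ x ∈ t, x ≤ a) := by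
  intro t a hge
  constructor
  · intro h
    cases t with
    | nil => simp [valleyB]
    | cons b s =>
      by_cases hba : b ≤ a
      · refine ⟨by simpa [valleyB, hba] using h, ?_⟩
        intro x hx
        rcases v_le (b :: s) a h x (List.mem_cons_of_mem a hx) with h1 | h1
        · exact h1
        · omega
      · have hnd : nondecB (a :: b :: s) = true := by simpa [valleyB, hba] using h
        have hb := nd_le_last (b :: s) a hnd b (by simp)
        omega
  · rintro ⟨hv, hall⟩
    cases t with
    | nil => simp [valleyB]
    | cons b s =>
      have hba : b ≤ a := hall b (List.mem_cons_self)
      simpa [valleyB, hba] using hv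

theorem vR : ∀ (t : List Int) (a : Int), a < (a :: t).getLast (by simp) →
    (valleyB (a :: t) = true ↔ valleyB (a :: t).dropLast = true ∧
      ∀ x ∈ (a :: t).dropLast, x ≤ (a :: t).getLast (by simp)) := by
  intro t a hlt
  constructor
  · intro h
    refine ⟨v_dropLast _ h, ?_⟩
    intro x hx
    rcases v_le t a h x (List.Sublist.subset (List.dropLast_sublist _) hx) with h1 | h1
    · omega
    · exact h1
  · rintro ⟨hv, hall⟩
    have := v_append ((a :: t).dropLast) ((a :: t).getLast (by simp)) hv hall
    rwa [List.dropLast_append_getLast (by simp)] at this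

theorem tp_eq (ys : List Int) (prev : Option Int) :
    tp ys prev = if (valleyB ys && bnd prev ys) = true then "Yes" else "No" := by
  match ys with
  | [] => cases prev <;> simp [tp, valleyB, bnd]
  | a :: t =>
    by_cases haR : a ≥ (a :: t).getLast (by simp)
    · have IH := tp_eq t (some a)
      have hL := vL t a haR
      rw [tp, if_pos haR, IH]
      have hLb : valleyB (a :: t) = (valleyB t && t.all (fun x => decide (x ≤ a))) := by
        apply Bool.coe_iff_coe.mp
        simp only [Bool.and_eq_true, List.all_eq_true, decide_eq_true_eq]
        exact hL
      cases prev with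
      | none => simp [aCheckGt, bnd, hLb]
      | some p =>
        by_cases hap : a > p
        · have h1 : ¬ (a ≤ p) := by omega
          simp [aCheckGt, bnd, hap, h1]
        · have hcond : (valleyB (a :: t) && bnd (some p) (a :: t)) =
              (valleyB t && bnd (some a) t) := by
            apply Bool.coe_iff_coe.mp
            simp only [Bool.and_eq_true, List.all_eq_true, decide_eq_true_eq, bnd,
              List.mem_cons, forall_eq_or_imp, hL]
            constructor
            · rintro ⟨⟨hv, hall⟩, _, hp⟩; exact ⟨hv, hall⟩
            · rintro ⟨hv, hall⟩
              refine ⟨⟨hv, hall⟩, by omega, fun x hx => by have := hall x hx; omega⟩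
          simp only [aCheckGt, hcond]
          simp [show ¬ (p < a) by omega]
    · have hlt : a < (a :: t).getLast (by simp) := by omega
      have IH := tp_eq ((a :: t).dropLast) (some ((a :: t).getLast (by simp)))
      have hR := vR t a hlt
      rw [tp, if_neg haR, IH]
      have hRmem : (a :: t).getLast (by simp) ∈ a :: t := List.getLast_mem (by simp)
      have hRb : valleyB (a :: t) = (valleyB (a :: t).dropLast &&
          ((a :: t).dropLast.all (fun x => decide (x ≤ (a :: t).getLast (by simp))))) := by
        apply Bool.coe_iff_coe.mp
        simp only [Bool.and_eq_true, List.all_eq_true, decide_eq_true_eq]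
        exact hR
      cases prev with
      | none => simp [aCheckGt, bnd, hRb]
      | some p =>
        by_cases hRp : (a :: t).getLast (by simp) > p
        · have hfalse : bnd (some p) (a :: t) = false := by
            simp only [bnd, List.all_eq_false]
            exact ⟨_, hRmem, by simp; omega⟩
          simp [aCheckGt, hRp, hfalse]
        · have hcond : (valleyB (a :: t) && bnd (some p) (a :: t)) =
              (valleyB (a :: t).dropLast &&
                bnd (some ((a :: t).getLast (by simp))) ((a :: t).dropLast)) := by
            apply Bool.coe_iff_coe.mp
            simp only [Bool.and_eq_true, List.all_eq_true, decide_eq_true_eq, bnd, hR]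
            constructor
            · rintro ⟨⟨hv, hall⟩, _⟩; exact ⟨hv, hall⟩
            · rintro ⟨hv, hall⟩
              refine ⟨⟨hv, hall⟩, fun x hx => ?_⟩
              have hsplit : x ∈ (a :: t).dropLast ++ [(a :: t).getLast (by simp)] := by
                rw [List.dropLast_append_getLast (by simp)]; exact hx
              rcases List.mem_append.mp hsplit with h1 | h1
              · have := hall x h1; omega
              · simp at h1; omega
          simp only [aCheckGt, hcond]
          simp [show ¬ (p < (a :: t).getLast (by simp)) by omega]
termination_by ys.length
decreasing_by all_goals simp

theorem tail_take_int (l : List Int) (n : Nat) :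
    (List.take (n + 1) l).tail = List.take n l.tail := by
  cases l <;> simp

theorem aLoop_eq : ∀ (fuel : Nat) (xs : List Int) (l : Int) (prev : Option Int), 0 ≤ l →
    l + fuel ≤ xs.length →
    aLoop xs fuel l (l + fuel - 1) prev = tp ((xs.drop l.toNat).take fuel) prev := by
  intro fuel
  induction fuel with
  | zero => intro xs l prev h0 hlen; simp [aLoop, tp]
  | succ f ih =>
    intro xs l prev h0 hlen
    have hlm : l = (l.toNat : Int) := (Int.toNat_of_nonneg h0).symm
    set m := l.toNat with hm
    have hmlen : m + f + 1 ≤ xs.length := by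
      rw [hlm] at hlen; push_cast at hlen; omega
    have hidx0 : m < xs.length := by omega
    have hidxf : m + f < xs.length := by omega
    have hseglen : ((xs.drop m).take (f + 1)).length = f + 1 := by
      simp; omega
    obtain ⟨a, rest, hseg⟩ : ∃ a rest, (xs.drop m).take (f + 1) = a :: rest :=
      List.exists_cons_of_ne_nil (by
        intro h; rw [h] at hseglen; simp at hseglen)
    have ha : a = xs[m]'hidx0 := by
      have h0' : ((xs.drop m).take (f + 1))[0]'(by omega) = a := by
        simp [hseg]
      simpa [List.getElem_take, List.getElem_drop] using h0'.symm
    have hlast : (a :: rest).getLast (by simp) = xs[m + f]'hidxf := by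
      have h1 : (a :: rest).getLast (by simp) =
          ((xs.drop m).take (f + 1)).getLast (by rw [hseg]; simp) := by
        congr 1
        exact hseg.symm
      rw [h1, List.getLast_eq_getElem]
      simp only [hseglen]
      simp [List.getElem_take, List.getElem_drop]
    have hg1 : PySem.List.pyGet? xs l = some a := by
      rw [PySem.List.pyGet?_eq_some_getElem xs h0 (by rw [hlm]; exact_mod_cast hidx0)]
      rw [ha]
    have hi2 : l + ((f : Int) + 1) - 1 = ((m + f : Nat) : Int) := by
      rw [hlm]; push_cast; ring
    have hg2 : PySem.List.pyGet? xs (l + ((f : Int) + 1) - 1) =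
        some ((a :: rest).getLast (by simp)) := by
      rw [hi2, PySem.List.pyGet?_natCast, List.getElem?_eq_getElem hidxf, hlast]
    have hrest : rest = (xs.drop (m + 1)).take f := by
      have h1 : ((xs.drop m).take (f + 1)).tail = rest := by rw [hseg]; rfl
      rw [tail_take_int, List.tail_drop] at h1
      exact h1.symm
    have hdl : (a :: rest).dropLast = (xs.drop m).take f := by
      rw [← hseg, List.dropLast_eq_take, hseglen]
      simp [List.take_take]
    have hunf : aLoop xs (f + 1) l (l + ((f : Int) + 1) - 1) prev =
        if a ≥ (a :: rest).getLast (by simp) then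
          if aCheckGt a prev then "No"
          else aLoop xs f (l + 1) (l + ((f : Int) + 1) - 1) (some a)
        else
          if aCheckGt ((a :: rest).getLast (by simp)) prev then "No"
          else aLoop xs f l (l + ((f : Int) + 1) - 1 - 1)
            (some ((a :: rest).getLast (by simp))) := by
      rw [aLoop, hg1, hg2]
    have hpush : (((f : Nat) + 1 : Nat) : Int) = (f : Int) + 1 := by push_cast; ring
    rw [hpush, hunf, hseg, tp]
    by_cases hcmp : a ≥ (a :: rest).getLast (by simp)
    · rw [if_pos hcmp, if_pos hcmp]
      by_cases hchk : aCheckGt a prev = true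
      · rw [if_pos hchk, if_pos hchk]
      · rw [if_neg hchk, if_neg hchk]
        have harith : l + ((f : Int) + 1) - 1 = (l + 1) + (f : Int) - 1 := by ring
        have hrec := ih xs (l + 1) (some a) (by omega)
          (by rw [hlm]; omega)
        have hm1 : (l + 1).toNat = m + 1 := by omega
        rw [harith, hrec, hm1, ← hrest]
    · rw [if_neg hcmp, if_neg hcmp]
      by_cases hchk : aCheckGt ((a :: rest).getLast (by simp)) prev = true
      · rw [if_pos hchk, if_pos hchk]
      · rw [if_neg hchk, if_neg hchk]
        have harith : l + ((f : Int) + 1) - 1 - 1 = l + (f : Int) - 1 := by ring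
        have hrec := ih xs l (some ((a :: rest).getLast (by simp))) h0
          (by rw [hlm]; omega)
        rw [harith, hrec, hdl]


theorem bUp_eq : ∀ (t : List Int) (a : Int), bUp a t = if nondecB (a :: t) then "Yes" else "No" := by
  intro t
  induction t with
  | nil => intro a; simp [bUp, nondecB]
  | cons b s ih =>
    intro a
    by_cases hba : b < a
    · simp [bUp, hba, nondecB, show ¬ (a ≤ b) by omega]
    · simp [bUp, hba, nondecB, show a ≤ b by omega, ih b]

theorem bDown_eq : ∀ (t : List Int) (a : Int), bDown a t = if valleyB (a :: t) then "Yes" else "No" := by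
  intro t
  induction t with
  | nil => intro a; simp [bDown, valleyB]
  | cons b s ih =>
    intro a
    by_cases hba : b ≤ a
    · simp [bDown, hba, valleyB, ih b]
    · simp only [bDown, valleyB, if_neg hba, bUp_eq s b, nondecB,
        Bool.and_eq_true, decide_eq_true_eq]
      have : a ≤ b := by omega
      simp [this]

-- ===== VERDICT (by name: the statement is the Claim_ definition above) =====
theorem check_stack_possibility_spec : Claim_equal_check_stack_possibility := by
  intro N xs _dom pre
  unfold Pre_check_stack_possibility at pre
  unfold Spec_check_stack_possibility check_stack_possibility check_stack_possibility_alt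
  have hs : PySem.List.slice xs none (some (max N 0)) = xs.take N.toNat := by
    rw [PySem.List.slice_to xs (by omega : (0:Int) ≤ max N 0)]
    congr 1
    omega
  simp only [hs]
  by_cases hN : N ≤ 0
  · have hz : N.toNat = 0 := by omega
    rw [hz]
    simp [aLoop]
  · have hlen : (0:Int) + (N.toNat : Int) ≤ xs.length := by omega
    have hNm1 : N - 1 = 0 + (N.toNat : Int) - 1 := by omega
    rw [hNm1, aLoop_eq N.toNat xs 0 none (le_refl 0) hlen]
    have hz0 : (0 : Int).toNat = 0 := rfl
    rw [hz0, List.drop_zero, tp_eq]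
    cases htake : xs.take N.toNat with
    | nil => simp [valleyB, bnd]
    | cons a t =>
      show _ = bDown a t
      rw [bDown_eq]
      simp [bnd]
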